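-- pv_equiv track=rewrite | github.com/cw417/stats-tools | leaf.py | remove_blank_stems
-- ===== SOURCE A (Python) =====
-- def remove_blank_stems(stem_dict):
--   """Removes blank stems from top and bottom of stem dictionary."""
--   min_checked = False
--   max_checked = False
--
--   # remove lower stems
--   while min_checked == False:
--     min_val = min([i for i in stem_dict.keys()])
--     if stem_dict.get(min_val) == []:
--       stem_dict.pop(min_val)
--     else:
--       min_checked = True
--
--   # remove upper stems
--   while max_checked == False:
--     max_val = max([i for i in stem_dict.keys()])
--     if stem_dict.get(max_val) == []:
--       stem_dict.pop(max_val)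
--     else:
--       max_checked = True
--
--   return stem_dict
-- ===== SOURCE B (Python) =====
-- def remove_blank_stems(stem_dict):
--   """Removes blank stems from top and bottom of stem dictionary."""
--   # Note: A trims its argument in place and returns it; B builds a fresh dict
--   # (return-value equivalence only).
--   keys = [k for k, v in stem_dict.items() if v != []]
--   lo, hi = min(keys), max(keys)
--   return {k: v for k, v in stem_dict.items() if lo <= k <= hi}
-- ===== Notes on version B (the rewrite author's own statement) =====
-- stated objective: simpler
-- what changed: A repeatedly scans all keys for the min (then max) and pops one blank entry per scan; B computes the min and max non-blank key once and keeps everything in between with a single filter pass.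
import Mathlib
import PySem

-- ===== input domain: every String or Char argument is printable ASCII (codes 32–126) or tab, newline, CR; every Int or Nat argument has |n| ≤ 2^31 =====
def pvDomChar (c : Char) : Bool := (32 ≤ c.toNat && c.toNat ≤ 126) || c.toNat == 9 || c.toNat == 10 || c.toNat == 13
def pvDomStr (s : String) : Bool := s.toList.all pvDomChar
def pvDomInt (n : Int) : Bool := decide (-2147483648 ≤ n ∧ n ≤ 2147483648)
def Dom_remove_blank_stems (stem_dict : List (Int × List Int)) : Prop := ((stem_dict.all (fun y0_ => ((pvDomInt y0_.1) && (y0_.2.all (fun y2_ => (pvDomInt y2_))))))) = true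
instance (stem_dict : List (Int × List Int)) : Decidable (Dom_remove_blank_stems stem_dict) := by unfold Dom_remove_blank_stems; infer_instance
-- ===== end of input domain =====

-- B computes the min and max non-blank keys once and keeps the entries in between with a
-- single filter, instead of A's repeated min/max-scan-and-pop loops (objective: simpler).
-- A trims its argument in place and returns it; B builds a fresh dict, so the equivalence
-- proved here is about the RETURN value only.


-- ===== PORT A =====
-- dict helpers over the association list (exact for dicts: keys are unique):
-- stem_dict.get(k) (first match), stem_dict.pop(k) (remove the entry with key k).
def pvGetA (l : List (Int × List Int)) (k : Int) : Option (List Int) :=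
  match l with
  | [] => none
  | p :: t => if p.1 = k then some p.2 else pvGetA t k

def pvPopA (l : List (Int × List Int)) (k : Int) : List (Int × List Int) :=
  match l with
  | [] => []
  | p :: t => if p.1 = k then t else p :: pvPopA t k

theorem pvPopA_length_lt (l : List (Int × List Int)) (k : Int) (v : List Int)
    (h : pvGetA l k = some v) : (pvPopA l k).length < l.length := by
  induction l with
  | nil => simp [pvGetA] at h
  | cons p t ih =>
    by_cases hk : p.1 = k
    · simp [pvPopA, hk]
    · simp only [pvGetA, hk, if_false] at h
      simp only [pvPopA, hk, if_false, List.length_cons]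
      exact Nat.succ_lt_succ (ih h)

-- 'while min_checked == False: …' of A
def pvLowerA (l : List (Int × List Int)) : List (Int × List Int) :=
  match hm : PySem.List.min? (l.map Prod.fst) (fun x => x) with
  | none => l      -- Python: min([]) raises ValueError; excluded by Pre_
  | some m =>
    match hg : pvGetA l m with
    | none => l    -- unreachable: the min of the keys is a key
    | some v =>
      if v = [] then pvLowerA (pvPopA l m) else l
termination_by l.length
decreasing_by exact pvPopA_length_lt l m v hg

-- 'while max_checked == False: …' of A
def pvUpperA (l : List (Int × List Int)) : List (Int × List Int) :=
  match hm : PySem.List.max? (l.map Prod.fst) (fun x => x) with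
  | none => l      -- Python: max([]) raises ValueError; excluded by Pre_
  | some m =>
    match hg : pvGetA l m with
    | none => l    -- unreachable: the max of the keys is a key
    | some v =>
      if v = [] then pvUpperA (pvPopA l m) else l
termination_by l.length
decreasing_by exact pvPopA_length_lt l m v hg

def remove_blank_stems (stem_dict : List (Int × List Int)) : List (Int × List Int) :=
  pvUpperA (pvLowerA stem_dict)

-- ===== PORT B =====
def remove_blank_stems_alt (stem_dict : List (Int × List Int)) : List (Int × List Int) :=
  let keys := (stem_dict.filter (fun p => decide (p.2 ≠ []))).map Prod.fst
  match PySem.List.min? keys (fun x => x), PySem.List.max? keys (fun x => x) with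
  | some lo, some hi => stem_dict.filter (fun p => decide (lo ≤ p.1 ∧ p.1 ≤ hi))
  | _, _ => stem_dict   -- Python: min([]) raises ValueError; excluded by Pre_

-- ===== PRECONDITION & SPEC =====
-- Pre_ excludes (a) inputs with no non-blank stem (there A's min()/max() of an emptied
-- dict raises ValueError, and B's min(keys) raises too), and (b) association lists with
-- duplicate keys, which do not represent a Python dict (both Pythons only ever see the
-- collapsed dict, so the list-level behaviour is unspecified).
def Pre_remove_blank_stems (stem_dict : List (Int × List Int)) : Prop :=
  (stem_dict.map Prod.fst).Nodup ∧ ∃ p ∈ stem_dict, p.2 ≠ []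
instance (stem_dict : List (Int × List Int)) : Decidable (Pre_remove_blank_stems stem_dict) := by unfold Pre_remove_blank_stems; infer_instance

def pvWitness_remove_blank_stems : (List (Int × List Int)) := [(1, []), (2, [3, 4]), (5, [])]

def Spec_remove_blank_stems (stem_dict : List (Int × List Int)) (out : List (Int × List Int)) : Prop := out = remove_blank_stems_alt stem_dict
instance (stem_dict : List (Int × List Int)) (out : List (Int × List Int)) : Decidable (Spec_remove_blank_stems stem_dict out) := by unfold Spec_remove_blank_stems; infer_instance

-- ===== CLAIM (what is proved, stated in full; the proofs are below) =====
def Claim_equal_remove_blank_stems : Prop := ∀ (stem_dict : List (Int × List Int)), Dom_remove_blank_stems stem_dict → Pre_remove_blank_stems stem_dict → Spec_remove_blank_stems stem_dict (remove_blank_stems stem_dict)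

-- ===== LEMMAS AND PROOFS =====
theorem pvGetA_mem (l : List (Int × List Int)) (k : Int) (v : List Int)
    (h : pvGetA l k = some v) : (k, v) ∈ l := by
  induction l with
  | nil => simp [pvGetA] at h
  | cons p t ih =>
    by_cases hk : p.1 = k
    · subst hk
      rw [pvGetA, if_pos rfl] at h
      cases h; simp
    · simp only [pvGetA, hk, if_false] at h
      exact List.mem_cons_of_mem _ (ih h)

theorem pvGetA_isSome (l : List (Int × List Int)) (k : Int)
    (h : k ∈ l.map Prod.fst) : ∃ v, pvGetA l k = some v := by
  induction l with
  | nil => simp at h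
  | cons p t ih =>
    by_cases hk : p.1 = k
    · exact ⟨p.2, by simp [pvGetA, hk]⟩
    · simp only [List.map_cons, List.mem_cons] at h
      rcases h with h | h
      · exact absurd h.symm hk
      · obtain ⟨v, hv⟩ := ih h
        exact ⟨v, by simp [pvGetA, hk, hv]⟩

theorem pvGetA_of_mem_nodup (l : List (Int × List Int)) (k : Int) (v : List Int)
    (hnd : (l.map Prod.fst).Nodup) (h : (k, v) ∈ l) : pvGetA l k = some v := by
  induction l with
  | nil => simp at h
  | cons p t ih =>
    simp only [List.map_cons, List.nodup_cons] at hnd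
    rcases List.mem_cons.mp h with h | h
    · subst h; simp [pvGetA]
    · have hk : p.1 ≠ k := by
        intro hc
        exact hnd.1 (hc ▸ (List.mem_map.mpr ⟨(k, v), h, rfl⟩))
      simp [pvGetA, hk, ih hnd.2 h]

theorem pvPopA_sublist (l : List (Int × List Int)) (k : Int) : (pvPopA l k).Sublist l := by
  induction l with
  | nil => simp [pvPopA]
  | cons p t ih =>
    by_cases hk : p.1 = k
    · simpa [pvPopA, hk] using List.sublist_cons_self p t
    · simpa [pvPopA, hk] using List.Sublist.cons₂ p ih

theorem pvPopA_filter (l : List (Int × List Int)) (k : Int) (v : List Int)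
    (P : Int × List Int → Bool) (h : pvGetA l k = some v) (hP : P (k, v) = false) :
    (pvPopA l k).filter P = l.filter P := by
  induction l with
  | nil => simp [pvGetA] at h
  | cons p t ih =>
    by_cases hk : p.1 = k
    · simp only [pvGetA, hk, if_true, Option.some.injEq] at h
      have hp : p = (k, v) := by rw [← hk, ← h]
      simp [pvPopA, hk, List.filter_cons, hp, hP]
    · simp only [pvGetA, hk, if_false] at h
      simp [pvPopA, hk, List.filter_cons, ih h]

theorem pvLowerA_eq (n : Nat) : ∀ (l : List (Int × List Int)), l.length ≤ n →
    (l.map Prod.fst).Nodup → ∀ (lo : Int),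
    PySem.List.min? ((l.filter (fun p => decide (p.2 ≠ []))).map Prod.fst) (fun x => x) = some lo →
    pvLowerA l = l.filter (fun p => decide (lo ≤ p.1)) := by
  induction n with
  | zero =>
    intro l hl _ lo hlo
    have : l = [] := List.length_eq_zero_iff.mp (Nat.le_zero.mp hl)
    subst this; simp [PySem.List.min?] at hlo
  | succ n ih =>
    intro l hl hnd lo hlo
    -- l is nonempty (it contains a non-blank entry)
    have hKne : (l.filter (fun p => decide (p.2 ≠ []))).map Prod.fst ≠ [] := by
      intro hc; rw [(PySem.List.min?_eq_none_iff _ _).mpr hc] at hlo; cases hlo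
    have hlne : l ≠ [] := by
      intro hc; subst hc; simp at hKne
    have hkeysne : l.map Prod.fst ≠ [] := by simpa using hlne
    obtain ⟨m, hm⟩ : ∃ m, PySem.List.min? (l.map Prod.fst) (fun x => x) = some m := by
      cases hmm : PySem.List.min? (l.map Prod.fst) (fun x => x) with
      | none => exact absurd ((PySem.List.min?_eq_none_iff _ _).mp hmm) hkeysne
      | some m => exact ⟨m, rfl⟩
    have hmmem : m ∈ l.map Prod.fst := PySem.List.min?_mem hm
    have hmmin : ∀ y ∈ l.map Prod.fst, m ≤ y := PySem.List.min?_isMin hm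
    obtain ⟨v, hv⟩ := pvGetA_isSome l m hmmem
    -- lo is the key of some non-blank entry of l, and m ≤ lo
    obtain ⟨q, hq, hqlo⟩ := List.mem_map.mp (PySem.List.min?_mem hlo)
    have hqmem : q ∈ l := List.mem_of_mem_filter hq
    have hqnb : q.2 ≠ [] := by simpa using List.of_mem_filter hq
    have hmlo : m ≤ lo := hqlo ▸ hmmin q.1 (List.mem_map.mpr ⟨q, hqmem, rfl⟩)
    have hbody : pvLowerA l = if v = [] then pvLowerA (pvPopA l m) else l := by
      rw [pvLowerA]
      split
      · next heq => rw [heq] at hm; cases hm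
      · next m' heq =>
        rw [hm] at heq; injection heq with heq; subst heq
        split
        · next hg => rw [hg] at hv; cases hv
        · next v' hg =>
          rw [hv] at hg; injection hg with hg; subst hg
          rfl
    rw [hbody]
    by_cases hveq : v = []
    · -- the minimal key is blank: popped, recurse
      subst hveq
      rw [if_pos rfl]
      have hmne : m ≠ lo := by
        intro hc
        have hg : pvGetA l q.1 = some q.2 := pvGetA_of_mem_nodup l q.1 q.2 hnd (by simpa using hqmem)
        rw [hqlo, ← hc, hv] at hg
        exact hqnb (Option.some_inj.mp hg).symm
      have hmlt : m < lo := lt_of_le_of_ne hmlo hmne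
      have hfilnb : (pvPopA l m).filter (fun p => decide (p.2 ≠ [])) =
          l.filter (fun p => decide (p.2 ≠ [])) :=
        pvPopA_filter l m [] _ hv (by simp)
      have hlen : (pvPopA l m).length ≤ n := by
        have := pvPopA_length_lt l m [] hv
        omega
      have hnd' : ((pvPopA l m).map Prod.fst).Nodup :=
        ((pvPopA_sublist l m).map Prod.fst).nodup hnd
      have hrec := ih (pvPopA l m) hlen hnd' lo (by rw [hfilnb]; exact hlo)
      rw [hrec]
      exact pvPopA_filter l m [] _ hv (by simp [not_le.mpr hmlt])
    · -- the minimal key is non-blank: stop; the filter keeps everything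
      simp only [hveq, if_false]
      have hmnb : (m, v) ∈ l.filter (fun p => decide (p.2 ≠ [])) :=
        List.mem_filter.mpr ⟨pvGetA_mem l m v hv, by simpa using hveq⟩
      have hlom : lo ≤ m :=
        PySem.List.min?_isMin hlo (m, v).1 (List.mem_map.mpr ⟨(m, v), hmnb, rfl⟩)
      refine (List.filter_eq_self.mpr ?_).symm
      intro p hp
      have : m ≤ p.1 := hmmin p.1 (List.mem_map.mpr ⟨p, hp, rfl⟩)
      simpa using le_trans hlom this

theorem pvUpperA_eq (n : Nat) : ∀ (l : List (Int × List Int)), l.length ≤ n →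
    (l.map Prod.fst).Nodup → ∀ (hi : Int),
    PySem.List.max? ((l.filter (fun p => decide (p.2 ≠ []))).map Prod.fst) (fun x => x) = some hi →
    pvUpperA l = l.filter (fun p => decide (p.1 ≤ hi)) := by
  induction n with
  | zero =>
    intro l hl _ hi hhi
    have : l = [] := List.length_eq_zero_iff.mp (Nat.le_zero.mp hl)
    subst this; simp [PySem.List.max?] at hhi
  | succ n ih =>
    intro l hl hnd hi hhi
    have hKne : (l.filter (fun p => decide (p.2 ≠ []))).map Prod.fst ≠ [] := by
      intro hc; rw [(PySem.List.max?_eq_none_iff _ _).mpr hc] at hhi; cases hhi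
    have hlne : l ≠ [] := by
      intro hc; subst hc; simp at hKne
    have hkeysne : l.map Prod.fst ≠ [] := by simpa using hlne
    obtain ⟨m, hm⟩ : ∃ m, PySem.List.max? (l.map Prod.fst) (fun x => x) = some m := by
      cases hmm : PySem.List.max? (l.map Prod.fst) (fun x => x) with
      | none => exact absurd ((PySem.List.max?_eq_none_iff _ _).mp hmm) hkeysne
      | some m => exact ⟨m, rfl⟩
    have hmmem : m ∈ l.map Prod.fst := PySem.List.max?_mem hm
    have hmmax : ∀ y ∈ l.map Prod.fst, y ≤ m := PySem.List.max?_isMax hm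
    obtain ⟨v, hv⟩ := pvGetA_isSome l m hmmem
    obtain ⟨q, hq, hqhi⟩ := List.mem_map.mp (PySem.List.max?_mem hhi)
    have hqmem : q ∈ l := List.mem_of_mem_filter hq
    have hqnb : q.2 ≠ [] := by simpa using List.of_mem_filter hq
    have hhim : hi ≤ m := hqhi ▸ hmmax q.1 (List.mem_map.mpr ⟨q, hqmem, rfl⟩)
    have hbody : pvUpperA l = if v = [] then pvUpperA (pvPopA l m) else l := by
      rw [pvUpperA]
      split
      · next heq => rw [heq] at hm; cases hm
      · next m' heq =>
        rw [hm] at heq; injection heq with heq; subst heq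
        split
        · next hg => rw [hg] at hv; cases hv
        · next v' hg =>
          rw [hv] at hg; injection hg with hg; subst hg
          rfl
    rw [hbody]
    by_cases hveq : v = []
    · subst hveq
      simp only [if_true]
      have hmne : m ≠ hi := by
        intro hc
        have hg : pvGetA l q.1 = some q.2 := pvGetA_of_mem_nodup l q.1 q.2 hnd (by simpa using hqmem)
        rw [hqhi, ← hc, hv] at hg
        exact hqnb (Option.some_inj.mp hg).symm
      have hmlt : hi < m := lt_of_le_of_ne hhim (Ne.symm hmne)
      have hfilnb : (pvPopA l m).filter (fun p => decide (p.2 ≠ [])) =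
          l.filter (fun p => decide (p.2 ≠ [])) :=
        pvPopA_filter l m [] _ hv (by simp)
      have hlen : (pvPopA l m).length ≤ n := by
        have := pvPopA_length_lt l m [] hv
        omega
      have hnd' : ((pvPopA l m).map Prod.fst).Nodup :=
        ((pvPopA_sublist l m).map Prod.fst).nodup hnd
      have hrec := ih (pvPopA l m) hlen hnd' hi (by rw [hfilnb]; exact hhi)
      rw [hrec]
      exact pvPopA_filter l m [] _ hv (by simp [not_le.mpr hmlt])
    · simp only [hveq, if_false]
      have hmnb : (m, v) ∈ l.filter (fun p => decide (p.2 ≠ [])) :=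
        List.mem_filter.mpr ⟨pvGetA_mem l m v hv, by simpa using hveq⟩
      have hmhi : m ≤ hi :=
        PySem.List.max?_isMax hhi (m, v).1 (List.mem_map.mpr ⟨(m, v), hmnb, rfl⟩)
      refine (List.filter_eq_self.mpr ?_).symm
      intro p hp
      have : p.1 ≤ m := hmmax p.1 (List.mem_map.mpr ⟨p, hp, rfl⟩)
      simpa using le_trans this hmhi

-- ===== VERDICT (by name: the statement is the Claim_ definition above) =====
theorem remove_blank_stems_spec : Claim_equal_remove_blank_stems := by
  intro l _hdom hpre
  obtain ⟨hnd, p0, hp0, hp0nb⟩ := hpre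
  have hp0f : p0 ∈ l.filter (fun p => decide (p.2 ≠ [])) :=
    List.mem_filter.mpr ⟨hp0, by simpa using hp0nb⟩
  have hKne : (l.filter (fun p => decide (p.2 ≠ []))).map Prod.fst ≠ [] := by
    intro hc
    have hmem : p0.1 ∈ (l.filter (fun p => decide (p.2 ≠ []))).map Prod.fst :=
      List.mem_map.mpr ⟨p0, hp0f, rfl⟩
    rw [hc] at hmem; simp at hmem
  obtain ⟨lo, hlo⟩ : ∃ lo,
      PySem.List.min? ((l.filter (fun p => decide (p.2 ≠ []))).map Prod.fst) (fun x => x) = some lo := by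
    cases hmm : PySem.List.min? ((l.filter (fun p => decide (p.2 ≠ []))).map Prod.fst) (fun x => x) with
    | none => exact absurd ((PySem.List.min?_eq_none_iff _ _).mp hmm) hKne
    | some lo => exact ⟨lo, rfl⟩
  obtain ⟨hi, hhi⟩ : ∃ hi,
      PySem.List.max? ((l.filter (fun p => decide (p.2 ≠ []))).map Prod.fst) (fun x => x) = some hi := by
    cases hmm : PySem.List.max? ((l.filter (fun p => decide (p.2 ≠ []))).map Prod.fst) (fun x => x) with
    | none => exact absurd ((PySem.List.max?_eq_none_iff _ _).mp hmm) hKne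
    | some hi => exact ⟨hi, rfl⟩
  have hlomin : ∀ p ∈ l.filter (fun p => decide (p.2 ≠ [])), lo ≤ p.1 := by
    intro p hp
    exact PySem.List.min?_isMin hlo p.1 (List.mem_map.mpr ⟨p, hp, rfl⟩)
  -- the lower pass
  have h1 : pvLowerA l = l.filter (fun p => decide (lo ≤ p.1)) :=
    pvLowerA_eq l.length l le_rfl hnd lo hlo
  -- the lower pass removes only blank entries
  have hfilnb : (l.filter (fun p => decide (lo ≤ p.1))).filter (fun p => decide (p.2 ≠ [])) =
      l.filter (fun p => decide (p.2 ≠ [])) := by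
    rw [List.filter_filter]
    refine List.filter_congr ?_
    intro a ha
    by_cases hab : a.2 = []
    · simp [hab]
    · have : lo ≤ a.1 := hlomin a (List.mem_filter.mpr ⟨ha, by simpa using hab⟩)
      simp [hab, this]
  have hnd1 : ((l.filter (fun p => decide (lo ≤ p.1))).map Prod.fst).Nodup :=
    (List.filter_sublist.map Prod.fst).nodup hnd
  have h2 : pvUpperA (l.filter (fun p => decide (lo ≤ p.1))) =
      (l.filter (fun p => decide (lo ≤ p.1))).filter (fun p => decide (p.1 ≤ hi)) :=
    pvUpperA_eq _ _ le_rfl hnd1 hi (by rw [hfilnb]; exact hhi)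
  show pvUpperA (pvLowerA l) = remove_blank_stems_alt l
  rw [h1, h2, List.filter_filter]
  simp only [remove_blank_stems_alt, hlo, hhi]
  refine List.filter_congr ?_
  intro a _
  by_cases h1 : lo ≤ a.1 <;> by_cases h2 : a.1 ≤ hi <;> simp [h1, h2]
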